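-- pv_equiv track=rewrite | github.com/Jasir-13/OTT-Analytics-RAG | main.py | pick_best_metric
-- ===== SOURCE A (Python) =====
-- def pick_best_metric(query: str, num_cols: list) -> str:
--     """
--     Match query keywords to the most relevant numeric column.
--     Falls back to the first column if nothing matches.
--     """
--     q = query.lower()
--     keyword_map = {
--         "revenue":      ["revenue", "income", "earn", "sales"],
--         "churn":        ["churn", "cancel", "attrition", "lost"],
--         "user":         ["user", "subscriber", "member", "account"],
--         "watch":        ["watch", "view", "hour", "time", "duration"],
--         "growth":       ["growth", "growth_rate", "increase"],
--         "rating":       ["rating", "score", "satisfaction"],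
--         "content":      ["content", "title", "show", "genre"],
--         "subscription": ["subscription", "plan", "tier"],
--     }
--     for col in num_cols:
--         col_lower = col.lower()
--         for intent, keywords in keyword_map.items():
--             if any(kw in col_lower for kw in keywords):
--                 if any(kw in q for kw in keywords):
--                     return col
--     # fallback: first column whose name appears in query
--     for col in num_cols:
--         if any(part in q for part in col.lower().split("_")):
--             return col
--     return num_cols[0]
-- ===== SOURCE B (Python) =====
-- _GROUPS = [
--     ["revenue", "income", "earn", "sales"],
--     ["churn", "cancel", "attrition", "lost"],
--     ["user", "subscriber", "member", "account"],
--     ["watch", "view", "hour", "time", "duration"],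
--     ["growth", "growth_rate", "increase"],
--     ["rating", "score", "satisfaction"],
--     ["content", "title", "show", "genre"],
--     ["subscription", "plan", "tier"],
-- ]
--
--
-- def pick_best_metric(query: str, num_cols: list) -> str:
--     """
--     Match query keywords to the most relevant numeric column.
--     Falls back to the first column if nothing matches.
--     """
--     q = query.lower()
--     # keywords of every intent group that the query activates, computed once
--     hot = [kw for kws in _GROUPS if any(k in q for k in kws) for kw in kws]
--     # one fused pass: look for a hot-keyword match while remembering the first
--     # fallback candidate (a column one of whose '_' parts occurs in the query)
--     fallback = None
--     for col in num_cols: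
--         cl = col.lower()
--         if any(kw in cl for kw in hot):
--             return col
--         if fallback is None and any(part in q for part in cl.split("_")):
--             fallback = col
--     return fallback if fallback is not None else num_cols[0]
-- ===== Notes on version B (the rewrite author's own statement) =====
-- stated objective: alternative
-- what changed: B replaces A's two staged loops over num_cols by one fused pass with a fallback accumulator: the active-intent keywords are computed once from the query, and a single loop over the columns both searches for a keyword match and remembers the first fallback candidate, returned (or num_cols[0]) at the end; per column B scans only the precomputed active keywords instead of rescanning the whole keyword map.
-- outside the precondition, e.g. on pick_best_metric('revenue', []): A raises IndexError, B raises IndexError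
import Mathlib
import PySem

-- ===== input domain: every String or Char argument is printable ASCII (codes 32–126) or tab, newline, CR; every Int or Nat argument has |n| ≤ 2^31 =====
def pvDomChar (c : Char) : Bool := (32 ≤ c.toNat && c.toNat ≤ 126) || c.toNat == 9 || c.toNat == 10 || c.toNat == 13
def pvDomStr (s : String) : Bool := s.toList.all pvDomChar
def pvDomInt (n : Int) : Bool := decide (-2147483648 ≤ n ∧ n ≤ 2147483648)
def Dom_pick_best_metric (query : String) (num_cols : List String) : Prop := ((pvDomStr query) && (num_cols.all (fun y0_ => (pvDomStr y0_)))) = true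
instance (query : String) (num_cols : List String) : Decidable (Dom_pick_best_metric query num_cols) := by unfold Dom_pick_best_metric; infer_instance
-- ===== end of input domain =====

-- B fuses A's two staged loops into one pass with a fallback accumulator, scanning each column
-- only against the keywords activated once from the query (alternative decomposition, same value).

-- The keyword map literal shared by both Python sources (intent → keywords, in source order).
def pvKeywordMap : List (String × List String) := [
  ("revenue",      ["revenue", "income", "earn", "sales"]),
  ("churn",        ["churn", "cancel", "attrition", "lost"]),
  ("user",         ["user", "subscriber", "member", "account"]),
  ("watch",        ["watch", "view", "hour", "time", "duration"]),
  ("growth",       ["growth", "growth_rate", "increase"]),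
  ("rating",       ["rating", "score", "satisfaction"]),
  ("content",      ["content", "title", "show", "genre"]),
  ("subscription", ["subscription", "plan", "tier"])]

-- ===== PORT A =====
-- A's first loop: first col such that some intent has a keyword in col_lower AND a keyword in q.
-- A's second loop: first col with a '_'-part of its lowercased name occurring in q.
-- num_cols[0] is pyGet?; the .getD "" is only reached where Python raises IndexError (excluded by Pre_).
def pick_best_metric (query : String) (num_cols : List String) : String :=
  let q := PySem.Str.lower query
  match num_cols.find? (fun col =>
      let col_lower := PySem.Str.lower col
      pvKeywordMap.any (fun p =>
        p.2.any (fun kw => PySem.Str.isIn kw col_lower) && p.2.any (fun kw => PySem.Str.isIn kw q))) with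
  | some col => col
  | none =>
    match num_cols.find? (fun col =>
        ((PySem.Str.split? (PySem.Str.lower col) "_").getD []).any (fun part => PySem.Str.isIn part q)) with
    | some col => col
    | none => (PySem.List.pyGet? num_cols 0).getD ""

-- ===== PORT B =====
-- B's `hot` comprehension: keywords of every intent group activated by q (filter then flatten).
def pvHot (q : String) : List String :=
  ((pvKeywordMap.map (fun p => p.2)).filter (fun kws => kws.any (fun k => PySem.Str.isIn k q))).flatMap id

-- B's inner recursive `go(cols, fallback)`: one fused pass; `dflt` is the closed-over num_cols[0]
-- (reached only when fallback is None, i.e. Python's num_cols[0]; .getD "" only where Python raises).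
def pvGo (q : String) (hot : List String) (dflt : String) : List String → Option String → String
  | [], fallback => fallback.getD dflt
  | col :: rest, fallback =>
    let cl := PySem.Str.lower col
    if hot.any (fun kw => PySem.Str.isIn kw cl) then col
    else pvGo q hot dflt rest
      (if fallback.isNone && ((PySem.Str.split? cl "_").getD []).any (fun part => PySem.Str.isIn part q)
       then some col else fallback)

def pick_best_metric_alt (query : String) (num_cols : List String) : String :=
  let q := PySem.Str.lower query
  pvGo q (pvHot q) ((PySem.List.pyGet? num_cols 0).getD "") num_cols none

-- ===== PRECONDITION & SPEC =====
-- Pre_ excludes only num_cols = [], on which the Python A (and B) raises IndexError at num_cols[0].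
def Pre_pick_best_metric (query : String) (num_cols : List String) : Prop := num_cols ≠ []
instance (_query : String) (num_cols : List String) : Decidable (Pre_pick_best_metric _query num_cols) := by
  unfold Pre_pick_best_metric; infer_instance

def pvWitness_pick_best_metric : String × List String := ("total revenue by plan", ["user_count", "monthly_revenue"])

def Spec_pick_best_metric (query : String) (num_cols : List String) (out : String) : Prop := out = pick_best_metric_alt query num_cols
instance (query : String) (num_cols : List String) (out : String) : Decidable (Spec_pick_best_metric query num_cols out) := by unfold Spec_pick_best_metric; infer_instance

-- ===== CLAIM (what is proved, stated in full; the proofs are below) =====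
def Claim_equal_pick_best_metric : Prop := ∀ (query : String) (num_cols : List String), Dom_pick_best_metric query num_cols → Pre_pick_best_metric query num_cols → Spec_pick_best_metric query num_cols (pick_best_metric query num_cols)

-- ===== LEMMAS AND PROOFS =====

-- B's flattened hot list sees a `fc`-keyword iff some group has both a `fc`- and a `fq`-keyword —
-- exactly A's per-column test (generic in the two membership tests).
theorem flatMap_filter_any {β : Type} (m : List (List β)) (fq fc : β → Bool) :
    (((m.filter (fun kws => kws.any fq)).flatMap id).any fc)
      = m.any (fun kws => kws.any fc && kws.any fq) := by
  induction m with
  | nil => rfl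
  | cons kws m ih =>
    by_cases h : kws.any fq = true
    · simp [h, ih, Bool.and_comm]
    · simp only [Bool.not_eq_true] at h
      simp [h, ih, Bool.and_comm]

-- The fused pass equals "find primary, else (accumulator or find fallback), else default".
theorem pvGo_spec (q : String) (hot : List String) (dflt : String) :
    ∀ (cols : List String) (fb : Option String),
    pvGo q hot dflt cols fb =
      match cols.find? (fun col => hot.any (fun kw => PySem.Str.isIn kw (PySem.Str.lower col))) with
      | some col => col
      | none =>
        match fb.or (cols.find? (fun col =>
            ((PySem.Str.split? (PySem.Str.lower col) "_").getD []).any (fun part => PySem.Str.isIn part q))) with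
        | some col => col
        | none => dflt
  | [], fb => by cases fb <;> simp [pvGo]
  | col :: rest, fb => by
    by_cases hp : hot.any (fun kw => PySem.Str.isIn kw (PySem.Str.lower col)) = true
    · rw [pvGo, if_pos hp,
        List.find?_cons_of_pos (p := fun col => hot.any fun kw => PySem.Str.isIn kw (PySem.Str.lower col)) (l := rest) hp]
    · simp only [Bool.not_eq_true] at hp
      rw [pvGo, if_neg (by beta_reduce; rw [hp]; exact Bool.false_ne_true), pvGo_spec q hot dflt rest,
        List.find?_cons_of_neg (p := fun col => hot.any fun kw => PySem.Str.isIn kw (PySem.Str.lower col)) (l := rest)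
          (by beta_reduce; rw [hp]; exact Bool.false_ne_true)]
      by_cases hf : ((PySem.Str.split? (PySem.Str.lower col) "_").getD []).any
          (fun part => PySem.Str.isIn part q) = true
      · rw [List.find?_cons_of_pos
          (p := fun col => ((PySem.Str.split? (PySem.Str.lower col) "_").getD []).any fun part => PySem.Str.isIn part q)
          (l := rest) hf, hf]
        cases fb <;> simp
      · simp only [Bool.not_eq_true] at hf
        rw [List.find?_cons_of_neg
          (p := fun col => ((PySem.Str.split? (PySem.Str.lower col) "_").getD []).any fun part => PySem.Str.isIn part q)
          (l := rest) (by beta_reduce; rw [hf]; exact Bool.false_ne_true), hf]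
        simp

-- B's hot list sees a keyword of col iff some group has both a col- and a query-keyword —
-- exactly A's per-column test.
theorem pvHot_any (q s : String) :
    ((pvHot q).any (fun kw => PySem.Str.isIn kw s))
      = pvKeywordMap.any (fun p =>
          p.2.any (fun kw => PySem.Str.isIn kw s) && p.2.any (fun kw => PySem.Str.isIn kw q)) := by
  simp [pvHot, flatMap_filter_any, List.any_map, Function.comp_def, Bool.and_comm]

theorem pick_eq (query : String) (num_cols : List String) :
    pick_best_metric query num_cols = pick_best_metric_alt query num_cols := by
  simp only [pick_best_metric, pick_best_metric_alt, pvGo_spec, pvHot_any, Option.none_or]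

-- ===== VERDICT (by name: the statement is the Claim_ definition above) =====
theorem pick_best_metric_spec : Claim_equal_pick_best_metric := by
  intro query num_cols _ _
  unfold Spec_pick_best_metric
  exact pick_eq query num_cols
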